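-- pv_equiv track=rewrite | github.com/pypi-data/pypi-mirror-403 | packages/ai-debugger-inc/ai_debugger_inc-0.1.2-py3-none-any.whl/aidb/adapters/lang/java/syntax_validator.py | _parse_javac_errors
-- ===== SOURCE A (Python) =====
-- def _parse_javac_errors(error_output: str) -> list:
--     """Parse javac error output to extract meaningful error messages.
--
--     Parameters
--     ----------
--     error_output : str
--         Raw error output from javac
--
--     Returns
--     -------
--     list
--         List of formatted error messages
--     """
--     errors = []
--     lines = error_output.split("\n")
--
--     for i, line in enumerate(lines):
--         # Look for error patterns like "file.java:10: error: ..."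
--         if ": error:" in line:
--             # Extract the error message
--             parts = line.split(": error:", 1)
--             if len(parts) == 2:
--                 location = parts[0].split(":")[-1] if ":" in parts[0] else ""
--                 error_desc = parts[1].strip()
--
--                 # Try to get the line with the caret (^) showing error position
--                 error_msg = "Java syntax error"
--                 if location:
--                     error_msg += f" at line {location}"
--                 error_msg += f": {error_desc}"
--
--                 # Look for the source line and caret in the next few lines
--                 for j in range(i + 1, min(i + 4, len(lines))):
--                     if "^" in lines[j]:
--                         # Include the problematic line and the caret
--                         if j > 0 and j - 1 < len(lines):
--                             error_msg += f"\n  {lines[j - 1]}"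
--                         error_msg += f"\n  {lines[j]}"
--                         break
--
--                 errors.append(error_msg)
--
--     return errors
-- ===== SOURCE B (Python) =====
-- def _parse_javac_errors(error_output: str) -> list:
--     lines = error_output.split("\n")
--     n = len(lines)
--     # One backward pass: next_caret[i] = smallest j > i with "^" in lines[j], else None.
--     next_caret = [None] * n
--     nxt = None
--     for i in range(n - 1, -1, -1):
--         next_caret[i] = nxt
--         if "^" in lines[i]:
--             nxt = i
--     errors = []
--     for i, line in enumerate(lines):
--         if ": error:" not in line:
--             continue
--         parts = line.split(": error:", 1)
--         if len(parts) != 2: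
--             continue
--         head, desc = parts
--         location = head.split(":")[-1] if ":" in head else ""
--         msg = "Java syntax error"
--         if location:
--             msg += f" at line {location}"
--         msg += f": {desc.strip()}"
--         j = next_caret[i]
--         if j is not None and j <= i + 3:
--             msg += f"\n  {lines[j - 1]}\n  {lines[j]}"
--         errors.append(msg)
--     return errors
-- ===== Notes on version B (the rewrite author's own statement) =====
-- stated objective: alternative
-- what changed: Replaces A's per-error forward scan of the next 3 lines (with break) by a single backward pass that precomputes, for every line, the index of the next caret line, which each error then consults with an arithmetic window test.
import Mathlib
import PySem

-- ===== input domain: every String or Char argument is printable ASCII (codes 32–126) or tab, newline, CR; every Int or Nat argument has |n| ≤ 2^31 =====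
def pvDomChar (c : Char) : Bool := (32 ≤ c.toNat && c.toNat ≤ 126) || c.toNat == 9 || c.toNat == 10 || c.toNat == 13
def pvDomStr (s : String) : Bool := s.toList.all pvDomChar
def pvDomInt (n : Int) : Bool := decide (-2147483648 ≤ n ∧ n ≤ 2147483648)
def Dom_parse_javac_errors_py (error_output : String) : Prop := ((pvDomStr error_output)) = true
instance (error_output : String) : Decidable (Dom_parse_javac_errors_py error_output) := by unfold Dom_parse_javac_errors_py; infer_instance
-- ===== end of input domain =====

-- B replaces A's per-error forward 3-line caret scan by one backward pass precomputing, for every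
-- line, the index of the next caret line; objective: alternative decomposition (same O(n) cost).

-- ===== PORT A =====
-- inner loop "for j in range(i+1, min(i+4, len(lines))): if '^' in lines[j]: …; break"
def pvA_caret (lines : List String) (js : List Int) (error_msg : String) : String :=
  match js with
  | [] => error_msg
  | j :: rest =>
    if PySem.Str.isIn "^" (PySem.List.pyGetD lines j "") then
      (if 0 < j ∧ j - 1 < (lines.length : Int) then
         error_msg ++ "\n  " ++ PySem.List.pyGetD lines (j - 1) ""
       else error_msg) ++ "\n  " ++ PySem.List.pyGetD lines j ""
    else pvA_caret lines rest error_msg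

def parse_javac_errors_py (error_output : String) : List String :=
  let lines := (PySem.Str.split? error_output "\n").getD []
  (PySem.List.enumerate lines).foldl (fun errors il =>
    let i := il.1
    let line := il.2
    if PySem.Str.isIn ": error:" line then
      let parts := (PySem.Str.splitMax? line ": error:" 1).getD []
      if parts.length = 2 then
        let p0 := PySem.List.pyGetD parts 0 ""
        let location := if PySem.Str.isIn ":" p0 then
            PySem.List.pyGetD ((PySem.Str.split? p0 ":").getD []) (-1) "" else ""
        let error_desc := PySem.Str.strip (PySem.List.pyGetD parts 1 "")
        let m1 := "Java syntax error"
        let m2 := if location ≠ "" then m1 ++ " at line " ++ location else m1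
        let m3 := m2 ++ ": " ++ error_desc
        let m4 := pvA_caret lines (PySem.List.pyRange (i + 1) (min (i + 4) (lines.length : Int)) 1) m3
        errors ++ [m4]
      else errors
    else errors) []

-- ===== PORT B =====
-- B's backward pass "for i in range(n-1, -1, -1): next_caret[i] = nxt; if '^' in lines[i]: nxt = i"
-- as right-recursion: returns (next_caret array for this suffix starting at index i, nxt after it).
def pvB_next (lines : List String) (i : Nat) : List (Option Nat) × Option Nat :=
  match lines with
  | [] => ([], none)
  | l :: rest =>
    let p := pvB_next rest (i + 1)
    (p.2 :: p.1, if PySem.Str.isIn "^" l then some i else p.2)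

def parse_javac_errors_py_alt (error_output : String) : List String :=
  let lines := (PySem.Str.split? error_output "\n").getD []
  let nextCaret := (pvB_next lines 0).1
  (PySem.List.enumerate lines).foldl (fun errors il =>
    let i := il.1
    let line := il.2
    if PySem.Str.isIn ": error:" line = false then errors else
    let parts := (PySem.Str.splitMax? line ": error:" 1).getD []
    if parts.length ≠ 2 then errors else
    let head := PySem.List.pyGetD parts 0 ""
    let desc := PySem.List.pyGetD parts 1 ""
    let location := if PySem.Str.isIn ":" head then
        PySem.List.pyGetD ((PySem.Str.split? head ":").getD []) (-1) "" else ""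
    let m1 := "Java syntax error"
    let m2 := if location ≠ "" then m1 ++ " at line " ++ location else m1
    let m3 := m2 ++ ": " ++ PySem.Str.strip desc
    let m4 := match PySem.List.pyGetD nextCaret i none with
      | some j =>
          if (j : Int) ≤ i + 3 then
            m3 ++ "\n  " ++ PySem.List.pyGetD lines ((j : Int) - 1) ""
               ++ "\n  " ++ PySem.List.pyGetD lines (j : Int) ""
          else m3
      | none => m3
    errors ++ [m4]) []

-- ===== PRECONDITION & SPEC =====
def Spec_parse_javac_errors_py (error_output : String) (out : List String) : Prop := out = parse_javac_errors_py_alt error_output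
instance (error_output : String) (out : List String) : Decidable (Spec_parse_javac_errors_py error_output out) := by unfold Spec_parse_javac_errors_py; infer_instance

-- ===== CLAIM (what is proved, stated in full; the proofs are below) =====
def Claim_equal_parse_javac_errors_py : Prop := ∀ (error_output : String), Dom_parse_javac_errors_py error_output → Spec_parse_javac_errors_py error_output (parse_javac_errors_py error_output)

-- ===== LEMMAS AND PROOFS =====

-- specification of B's next-caret array: first index ≥ b (in the given suffix) whose line holds '^'
def pvFirstCaret : List String → Nat → Option Nat
  | [], _ => none
  | l :: rest, b => if PySem.Str.isIn "^" l then some b else pvFirstCaret rest (b + 1)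

theorem pvB_next_snd (lines : List String) (k : Nat) :
    (pvB_next lines k).2 = pvFirstCaret lines k := by
  induction lines generalizing k with
  | nil => rfl
  | cons l rest ih => simp only [pvB_next, pvFirstCaret, ih]

theorem pvB_next_len (lines : List String) (k : Nat) :
    (pvB_next lines k).1.length = lines.length := by
  induction lines generalizing k with
  | nil => rfl
  | cons l rest ih => simp [pvB_next, ih]

theorem pvB_next_get (lines : List String) (k m : Nat) (h : m < lines.length) :
    (pvB_next lines k).1.getD m none = pvFirstCaret (lines.drop (m + 1)) (k + m + 1) := by
  induction lines generalizing k m with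
  | nil => simp at h
  | cons l rest ih =>
    cases m with
    | zero => simpa [pvB_next] using pvB_next_snd rest (k + 1)
    | succ m' =>
      have h' : m' < rest.length := by simpa using Nat.lt_of_succ_lt_succ h
      have := ih (k + 1) m' h'
      simp only [pvB_next, List.getD_cons_succ, List.drop_succ_cons]
      rw [this]
      ring_nf

theorem pvFirstCaret_spec (ls : List String) (b j : Nat)
    (h : pvFirstCaret ls b = some j) : b ≤ j ∧ j - b < ls.length := by
  induction ls generalizing b with
  | nil => simp [pvFirstCaret] at h
  | cons l rest ih =>
    by_cases hc : PySem.Str.isIn "^" l = true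
    · simp only [pvFirstCaret, hc, if_true] at h
      obtain rfl : b = j := Option.some.inj h
      simp only [List.length_cons]
      omega
    · simp only [pvFirstCaret, hc] at h
      have := ih (b + 1) h
      simp only [List.length_cons]
      omega

theorem pvA_window (lines : List String) (msg : String) (b : Nat) (hb : b ≤ lines.length) :
    ∀ (a : Nat),
    pvA_caret lines (PySem.List.pyRange (a : Int) (b : Int) 1) msg =
      match pvFirstCaret (lines.drop a) a with
      | some j =>
          if j < b then
            (if 0 < (j : Int) ∧ (j : Int) - 1 < (lines.length : Int) then
               msg ++ "\n  " ++ PySem.List.pyGetD lines ((j : Int) - 1) ""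
             else msg) ++ "\n  " ++ PySem.List.pyGetD lines (j : Int) ""
          else msg
      | none => msg := by
  intro a
  induction hd : b - a generalizing a with
  | zero =>
    have hba : b ≤ a := by omega
    have hr : PySem.List.pyRange (a : Int) (b : Int) 1 = [] := by
      rw [PySem.List.pyRange_of_pos _ _ one_pos]
      simp [show ¬ ((a : Int) < (b : Int)) by exact_mod_cast not_lt.mpr hba]
    rw [hr]
    cases hfc : pvFirstCaret (lines.drop a) a with
    | none => rfl
    | some j =>
      have := pvFirstCaret_spec _ _ _ hfc
      simp only [pvA_caret]
      rw [if_neg (by omega)]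
  | succ n ih =>
    have hab : a < b := by omega
    have ha : a < lines.length := lt_of_lt_of_le hab hb
    have hr : PySem.List.pyRange (a : Int) (b : Int) 1
        = (a : Int) :: PySem.List.pyRange ((a : Int) + 1) (b : Int) 1 := by
      exact PySem.List.pyRange_one_cons (by exact_mod_cast hab)
    have hga : PySem.List.pyGetD lines (a : Int) "" = lines[a] := by
      rw [PySem.List.pyGetD_natCast, List.getD_eq_getElem _ _ ha]
    have hdrop : lines.drop a = lines[a] :: lines.drop (a + 1) := List.drop_eq_getElem_cons ha
    rw [hr]
    simp only [pvA_caret, hga, hdrop]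
    by_cases hc : PySem.Str.isIn "^" lines[a] = true
    · simp only [pvFirstCaret, hc, if_pos]
      rw [if_pos hab, hga]
    · simp only [pvFirstCaret, hc, Bool.false_eq_true, if_false]
      have : ((a : Int) + 1) = ((a + 1 : Nat) : Int) := by push_cast; ring
      rw [this]
      exact ih (a + 1) (by omega)

theorem pvStep_eq (lines : List String) (k : Nat) (hk : k < lines.length) (acc : List String) :
    (if PySem.Str.isIn ": error:" lines[k] then
      if ((PySem.Str.splitMax? lines[k] ": error:" 1).getD []).length = 2 then
        acc ++ [pvA_caret lines
            (PySem.List.pyRange ((k : Int) + 1) (min ((k : Int) + 4) (lines.length : Int)) 1)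
            ((if (if PySem.Str.isIn ":" (PySem.List.pyGetD ((PySem.Str.splitMax? lines[k] ": error:" 1).getD []) 0 "") then
                    PySem.List.pyGetD ((PySem.Str.split? (PySem.List.pyGetD ((PySem.Str.splitMax? lines[k] ": error:" 1).getD []) 0 "") ":").getD []) (-1) ""
                  else "") ≠ "" then
                "Java syntax error" ++ " at line " ++
                  (if PySem.Str.isIn ":" (PySem.List.pyGetD ((PySem.Str.splitMax? lines[k] ": error:" 1).getD []) 0 "") then
                    PySem.List.pyGetD ((PySem.Str.split? (PySem.List.pyGetD ((PySem.Str.splitMax? lines[k] ": error:" 1).getD []) 0 "") ":").getD []) (-1) ""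
                  else "")
              else "Java syntax error") ++ ": " ++
              PySem.Str.strip (PySem.List.pyGetD ((PySem.Str.splitMax? lines[k] ": error:" 1).getD []) 1 ""))]
      else acc
    else acc)
    =
    (if PySem.Str.isIn ": error:" lines[k] = false then acc else
     if ((PySem.Str.splitMax? lines[k] ": error:" 1).getD []).length ≠ 2 then acc else
     acc ++ [match PySem.List.pyGetD (pvB_next lines 0).1 (k : Int) none with
        | some j =>
            if (j : Int) ≤ (k : Int) + 3 then
              ((if (if PySem.Str.isIn ":" (PySem.List.pyGetD ((PySem.Str.splitMax? lines[k] ": error:" 1).getD []) 0 "") then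
                    PySem.List.pyGetD ((PySem.Str.split? (PySem.List.pyGetD ((PySem.Str.splitMax? lines[k] ": error:" 1).getD []) 0 "") ":").getD []) (-1) ""
                  else "") ≠ "" then
                "Java syntax error" ++ " at line " ++
                  (if PySem.Str.isIn ":" (PySem.List.pyGetD ((PySem.Str.splitMax? lines[k] ": error:" 1).getD []) 0 "") then
                    PySem.List.pyGetD ((PySem.Str.split? (PySem.List.pyGetD ((PySem.Str.splitMax? lines[k] ": error:" 1).getD []) 0 "") ":").getD []) (-1) ""
                  else "")
              else "Java syntax error") ++ ": " ++
              PySem.Str.strip (PySem.List.pyGetD ((PySem.Str.splitMax? lines[k] ": error:" 1).getD []) 1 ""))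
                ++ "\n  " ++ PySem.List.pyGetD lines ((j : Int) - 1) ""
                ++ "\n  " ++ PySem.List.pyGetD lines (j : Int) ""
            else
              ((if (if PySem.Str.isIn ":" (PySem.List.pyGetD ((PySem.Str.splitMax? lines[k] ": error:" 1).getD []) 0 "") then
                    PySem.List.pyGetD ((PySem.Str.split? (PySem.List.pyGetD ((PySem.Str.splitMax? lines[k] ": error:" 1).getD []) 0 "") ":").getD []) (-1) ""
                  else "") ≠ "" then
                "Java syntax error" ++ " at line " ++
                  (if PySem.Str.isIn ":" (PySem.List.pyGetD ((PySem.Str.splitMax? lines[k] ": error:" 1).getD []) 0 "") then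
                    PySem.List.pyGetD ((PySem.Str.split? (PySem.List.pyGetD ((PySem.Str.splitMax? lines[k] ": error:" 1).getD []) 0 "") ":").getD []) (-1) ""
                  else "")
              else "Java syntax error") ++ ": " ++
              PySem.Str.strip (PySem.List.pyGetD ((PySem.Str.splitMax? lines[k] ": error:" 1).getD []) 1 ""))
        | none =>
            ((if (if PySem.Str.isIn ":" (PySem.List.pyGetD ((PySem.Str.splitMax? lines[k] ": error:" 1).getD []) 0 "") then
                    PySem.List.pyGetD ((PySem.Str.split? (PySem.List.pyGetD ((PySem.Str.splitMax? lines[k] ": error:" 1).getD []) 0 "") ":").getD []) (-1) ""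
                  else "") ≠ "" then
                "Java syntax error" ++ " at line " ++
                  (if PySem.Str.isIn ":" (PySem.List.pyGetD ((PySem.Str.splitMax? lines[k] ": error:" 1).getD []) 0 "") then
                    PySem.List.pyGetD ((PySem.Str.split? (PySem.List.pyGetD ((PySem.Str.splitMax? lines[k] ": error:" 1).getD []) 0 "") ":").getD []) (-1) ""
                  else "")
              else "Java syntax error") ++ ": " ++
              PySem.Str.strip (PySem.List.pyGetD ((PySem.Str.splitMax? lines[k] ": error:" 1).getD []) 1 ""))]) := by
  by_cases h1 : PySem.Str.isIn ": error:" lines[k] = true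
  case neg =>
    rw [if_neg h1, if_pos (show PySem.Str.isIn ": error:" lines[k] = false by simpa using h1)]
  case pos =>
    rw [if_pos h1, if_neg (show ¬ PySem.Str.isIn ": error:" lines[k] = false by rw [h1]; decide)]
    by_cases h2 : ((PySem.Str.splitMax? lines[k] ": error:" 1).getD []).length = 2
    case neg =>
      rw [if_neg h2, if_pos (show ((PySem.Str.splitMax? lines[k] ": error:" 1).getD []).length ≠ 2 from h2)]
    case pos =>
      rw [if_pos h2, if_neg (show ¬ ((PySem.Str.splitMax? lines[k] ": error:" 1).getD []).length ≠ 2 from fun h => h h2)]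
      congr 1
      congr 1
      -- the two caret-augmented messages agree
      have hmin : (min ((k : Int) + 4) ((lines.length : Int))) = ((min (k + 4) lines.length : Nat) : Int) := by
        push_cast; ring_nf
      have hk1 : ((k : Int) + 1) = ((k + 1 : Nat) : Int) := by push_cast; ring
      rw [hk1, hmin, pvA_window lines _ (min (k + 4) lines.length) (by omega) (k + 1)]
      have hnc : PySem.List.pyGetD (pvB_next lines 0).1 (k : Int) none
          = pvFirstCaret (lines.drop (k + 1)) (k + 1) := by
        rw [PySem.List.pyGetD_natCast, List.getD_eq_getElem _ _ (by rw [pvB_next_len]; exact hk)]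
        have := pvB_next_get lines 0 k hk
        rw [List.getD_eq_getElem _ _ (by rw [pvB_next_len]; exact hk)] at this
        rw [this]
        ring_nf
      rw [hnc]
      cases hfc : pvFirstCaret (lines.drop (k + 1)) (k + 1) with
      | none => rfl
      | some j =>
        simp only []
        have hsp := pvFirstCaret_spec _ _ _ hfc
        have hjlen : j < lines.length := by
          have h2' := hsp.2
          simp only [List.length_drop] at h2'
          omega
        by_cases hj : j < min (k + 4) lines.length
        · rw [if_pos hj, if_pos (show (j : Int) ≤ (k : Int) + 3 by exact_mod_cast (show j ≤ k + 3 by omega))]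
          rw [if_pos (show 0 < (j : Int) ∧ (j : Int) - 1 < (lines.length : Int) by
            constructor
            · exact_mod_cast Nat.pos_of_ne_zero (by omega)
            · have : (j : Int) < (lines.length : Int) := by exact_mod_cast hjlen
              omega)]
        · rw [if_neg hj, if_neg (show ¬ (j : Int) ≤ (k : Int) + 3 by
            intro hc
            have hj3 : j ≤ k + 3 := by exact_mod_cast hc
            exact hj (by omega))]

theorem parse_javac_errors_py_spec : Claim_equal_parse_javac_errors_py := by
  unfold Claim_equal_parse_javac_errors_py
  intro s _
  unfold Spec_parse_javac_errors_py parse_javac_errors_py parse_javac_errors_py_alt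
  apply PySem.List.foldl_congr_mem
  intro acc il hmem
  obtain ⟨k, hk, hp⟩ := (PySem.List.mem_enumerate_iff _ _ _).mp hmem
  rw [zero_add] at hp
  subst hp
  exact pvStep_eq _ k hk acc

-- ===== VERDICT (by name: the statement is the Claim_ definition above) =====
-- (verdict theorem is parse_javac_errors_py_spec above)
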